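-- pv_equiv track=rewrite | github.com/spettigrew/cs2-codesignal-mod-quizzes | time_space_complexity/find_added_letter.py | csFindAddedLetter
-- ===== SOURCE A (Python) =====
-- def csFindAddedLetter(str_1, str_2):
--     # set a new_str to be str1 + str2
--     new_str1 = sorted(str_1)
--     new_str2 = sorted(str_2)     # one longer
--     # add to sorted new string one, to match the length of string2
--     new_str1.append(" ")
--     # compare string 1 to string 2 to find the added letter
--     count = 0
--     # for every letter in string2, compare to letter in string 1 at the same index
--     for idx in new_str2:
--         # if they don't match, return string2 for new char
--         if idx != new_str1[count]:
--            return idx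
--            # incremement to next letter
--         count += 1
-- ===== SOURCE B (Python) =====
-- def csFindAddedLetter(str_1, str_2):
--     a = _counting_sorted(str_1)
--     b = _counting_sorted(str_2)
--     for x, y in zip(a, b):
--         if x != y:
--             return y
--     if len(b) > len(a):
--         return b[len(a)]
--     return None
--
--
-- def _counting_sorted(s):
--     freq = {}
--     for ch in s:
--         freq[ch] = freq.get(ch, 0) + 1
--     out = []
--     for code in range(256):
--         out.extend([chr(code)] * freq.get(chr(code), 0))
--     return out
-- ===== Notes on version B (the rewrite author's own statement) =====
-- stated objective: alternative
-- what changed: B replaces A's comparison sort plus sentinel-padded index scan by a counting sort over the 256-code byte alphabet followed by a zip scan with an explicit leftover check; Pre_ excludes only the inputs on which A raises IndexError.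
-- intended difference: When str_2 is a permutation of str_1 plus one added space and every character of str_1 is <= ' ', A returns None because the added space collides with A's sentinel pad, while B returns ' ', the letter that was actually added. — e.g. on csFindAddedLetter("", " "): A returns none, B returns some " "
import Mathlib
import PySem

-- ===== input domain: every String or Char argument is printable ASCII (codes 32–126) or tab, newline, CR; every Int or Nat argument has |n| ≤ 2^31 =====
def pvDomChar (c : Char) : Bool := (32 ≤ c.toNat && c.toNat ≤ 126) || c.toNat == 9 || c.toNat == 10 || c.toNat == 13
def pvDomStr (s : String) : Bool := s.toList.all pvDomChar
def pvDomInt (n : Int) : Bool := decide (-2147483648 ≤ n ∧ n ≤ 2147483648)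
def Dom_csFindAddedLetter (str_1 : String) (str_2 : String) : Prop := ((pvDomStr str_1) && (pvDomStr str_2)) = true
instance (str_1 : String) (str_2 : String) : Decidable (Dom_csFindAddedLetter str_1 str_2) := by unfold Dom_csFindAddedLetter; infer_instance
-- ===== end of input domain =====

-- B replaces A's comparison sort + sentinel-padded index scan by a counting sort over the
-- byte alphabet and a zip scan with an explicit leftover check (objective: alternative).

-- ===== PORT A =====
-- the loop 'for idx in new_str2: if idx != new_str1[count]: return idx; count += 1'
def goA (l1 : List Char) : List Char → Int → Option String
  | [], _ => none
  | b :: rest, count =>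
    match PySem.List.pyGet? l1 count with
    | none => none   -- IndexError (new_str1[count] out of range; excluded by Pre_)
    | some a => if b ≠ a then some (String.ofList [b]) else goA l1 rest (count + 1)

def csFindAddedLetter (str_1 : String) (str_2 : String) : Option String :=
  goA (PySem.List.sorted str_1.toList (fun x => x) false ++ [' '])
      (PySem.List.sorted str_2.toList (fun x => x) false) 0

-- ===== PORT B =====
-- '_counting_sorted(s)': count each character, then emit the blocks in ascending code order
def csortB (s : List Char) : List Char :=
  (PySem.List.pyRange 0 256 1).foldl
    (fun out code =>
      out ++ List.replicate
        ((s.foldl (fun (d : PySem.Dict Char Int) ch => d.insert ch (d.getD ch 0 + 1))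
            PySem.Dict.empty).getD (Char.ofNat code.toNat) 0).toNat
        (Char.ofNat code.toNat)) []

-- 'for x, y in zip(a, b): if x != y: return y'
def goZ : List Char → List Char → Option Char
  | x :: xs, y :: ys => if x ≠ y then some y else goZ xs ys
  | _, _ => none

-- the tail of B: zip scan, then 'if len(b) > len(a): return b[len(a)]; return None'
def bZip (a b : List Char) : Option String :=
  match goZ a b with
  | some y => some (String.ofList [y])
  | none =>
    if b.length > a.length then
      (PySem.List.pyGet? b (a.length : Int)).map (fun y => String.ofList [y])
    else none

def csFindAddedLetter_alt (str_1 : String) (str_2 : String) : Option String :=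
  bZip (csortB str_1.toList) (csortB str_2.toList)

-- ===== PRECONDITION & SPEC =====
-- Pre_ excludes exactly the inputs on which A raises IndexError: sorted(str_2) strictly
-- extends sorted(str_1) followed by the sentinel space (the scan walks past the pad).
def Pre_csFindAddedLetter (str_1 : String) (str_2 : String) : Prop :=
  ¬ (str_1.toList.length + 1 < str_2.toList.length ∧
    (PySem.List.sorted str_2.toList (fun x => x) false).take (str_1.toList.length + 1)
      = PySem.List.sorted str_1.toList (fun x => x) false ++ [' '])
instance (str_1 : String) (str_2 : String) : Decidable (Pre_csFindAddedLetter str_1 str_2) := by unfold Pre_csFindAddedLetter; infer_instance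
def pvWitness_csFindAddedLetter : String × String := ("ab", "bca")

-- On inputs where str_2 is str_1 plus one added space and every character of str_1 is ≤ ' ',
-- A returns none (the added space collides with A's sentinel pad) while B returns " ",
-- the letter that was actually added — the intended value.
def D_csFindAddedLetter (str_1 : String) (str_2 : String) : Prop :=
  str_2.toList.Perm (' ' :: str_1.toList) ∧ str_1.toList.all (fun c => decide (c ≤ ' ')) = true
instance (str_1 : String) (str_2 : String) : Decidable (D_csFindAddedLetter str_1 str_2) := by unfold D_csFindAddedLetter; infer_instance

def Spec_csFindAddedLetter (str_1 : String) (str_2 : String) (out : Option String) : Prop := ¬ D_csFindAddedLetter str_1 str_2 → out = csFindAddedLetter_alt str_1 str_2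
instance (str_1 : String) (str_2 : String) (out : Option String) : Decidable (Spec_csFindAddedLetter str_1 str_2 out) := by unfold Spec_csFindAddedLetter; infer_instance

def pvDiffWitness_csFindAddedLetter : String × String := ("", " ")
def pvDiffWitnessOut_csFindAddedLetter : (Option String) × (Option String) := (none, some " ")

-- ===== CLAIM (what is proved, stated in full; the proofs are below) =====
def Claim_unchanged_csFindAddedLetter : Prop := ∀ (str_1 : String) (str_2 : String), Dom_csFindAddedLetter str_1 str_2 → Pre_csFindAddedLetter str_1 str_2 → Spec_csFindAddedLetter str_1 str_2 (csFindAddedLetter str_1 str_2)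
def Claim_changed_csFindAddedLetter : Prop := Dom_csFindAddedLetter (pvDiffWitness_csFindAddedLetter.1) (pvDiffWitness_csFindAddedLetter.2) ∧ Pre_csFindAddedLetter (pvDiffWitness_csFindAddedLetter.1) (pvDiffWitness_csFindAddedLetter.2) ∧ D_csFindAddedLetter (pvDiffWitness_csFindAddedLetter.1) (pvDiffWitness_csFindAddedLetter.2) ∧ csFindAddedLetter (pvDiffWitness_csFindAddedLetter.1) (pvDiffWitness_csFindAddedLetter.2) = pvDiffWitnessOut_csFindAddedLetter.1 ∧ csFindAddedLetter_alt (pvDiffWitness_csFindAddedLetter.1) (pvDiffWitness_csFindAddedLetter.2) = pvDiffWitnessOut_csFindAddedLetter.2 ∧ pvDiffWitnessOut_csFindAddedLetter.1 ≠ pvDiffWitnessOut_csFindAddedLetter.2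
def Claim_exact_csFindAddedLetter : Prop := ∀ (str_1 : String) (str_2 : String), Dom_csFindAddedLetter str_1 str_2 → Pre_csFindAddedLetter str_1 str_2 → D_csFindAddedLetter str_1 str_2 → csFindAddedLetter str_1 str_2 ≠ csFindAddedLetter_alt str_1 str_2

-- ===== LEMMAS AND PROOFS =====

-- reference scan of A: compare b::v against a::u pointwise, return first mismatching b
def pvGo : List Char → List Char → Option Char
  | _, [] => none
  | [], _ :: _ => none
  | a :: u, b :: v => if b ≠ a then some b else pvGo u v

-- reference value of B's scan at the Char level
def bSpec (u v : List Char) : Option Char :=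
  match goZ u v with
  | some y => some y
  | none => if v.length > u.length then v[u.length]? else none

lemma pvGo_nil_right (u : List Char) : pvGo u [] = none := by
  cases u <;> rfl

lemma bridgeA (v : List Char) : ∀ (u : List Char) (n : Nat),
    goA u v (n : Int) = (pvGo (u.drop n) v).map (fun b => String.ofList [b]) := by
  induction v with
  | nil => intro u n; simp [goA, pvGo_nil_right]
  | cons b rest ih =>
    intro u n
    show (match PySem.List.pyGet? u (n : Int) with
      | none => none
      | some a => if b ≠ a then some (String.ofList [b]) else goA u rest ((n : Int) + 1))
      = (pvGo (u.drop n) (b :: rest)).map (fun x => String.ofList [x])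
    rw [PySem.List.pyGet?_natCast]
    cases h : u[n]? with
    | none =>
      have hlen : u.length ≤ n := by
        rcases Nat.lt_or_ge n u.length with hc | hc
        · rw [List.getElem?_eq_getElem hc] at h; cases h
        · exact hc
      rw [List.drop_eq_nil_of_le hlen]
      rfl
    | some a =>
      obtain ⟨hn, hna⟩ := List.getElem?_eq_some_iff.mp h
      have hdrop : u.drop n = a :: u.drop (n + 1) := by
        rw [← hna]; exact (List.getElem_cons_drop hn).symm
      rw [hdrop]
      by_cases hba : b = a
      · subst hba
        have hcast : ((n : Int) + 1) = ((n + 1 : Nat) : Int) := by push_cast; ring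
        rw [hcast, ih u (n + 1)]
        simp [pvGo]
      · simp [pvGo, hba]

lemma toNat_ofNat256 {n : Nat} (h : n < 256) : (Char.ofNat n).toNat = n := by
  have hv : n.isValidChar := Or.inl (by omega)
  simp [Char.ofNat, hv]

-- counting-sort output as a reference flatMap over the code range
def csF (s : List Char) (n : Nat) : List Char :=
  (List.range n).flatMap (fun k => List.replicate (s.count (Char.ofNat k)) (Char.ofNat k))

lemma csF_succ (s : List Char) (n : Nat) :
    csF s (n + 1) = csF s n ++ List.replicate (s.count (Char.ofNat n)) (Char.ofNat n) := by
  simp [csF, List.range_succ]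

lemma mem_csF {s : List Char} {n : Nat} {x : Char} (hx : x ∈ csF s n) :
    ∃ j, j < n ∧ x = Char.ofNat j := by
  obtain ⟨k, hk, hrep⟩ := List.mem_flatMap.mp hx
  exact ⟨k, List.mem_range.mp hk, List.eq_of_mem_replicate hrep⟩

lemma pairwise_csF (s : List Char) (n : Nat) (hn : n ≤ 256) : (csF s n).Pairwise (· ≤ ·) := by
  induction n with
  | zero => simp [csF]
  | succ m ih =>
    rw [csF_succ]
    apply List.pairwise_append.mpr
    refine ⟨ih (by omega), List.pairwise_replicate.mpr (Or.inr le_rfl), ?_⟩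
    intro x hx y hy
    obtain ⟨j, hj, rfl⟩ := mem_csF hx
    rw [List.eq_of_mem_replicate hy]
    have hle : (Char.ofNat j).toNat ≤ (Char.ofNat m).toNat := by
      rw [toNat_ofNat256 (by omega), toNat_ofNat256 (by omega)]
      omega
    exact Char.le_def.mpr hle

lemma count_csF (s : List Char) (n : Nat) (hn : n ≤ 256) (c : Char) :
    (csF s n).count c = if c.toNat < n then s.count c else 0 := by
  induction n with
  | zero => simp [csF]
  | succ m ih =>
    rw [csF_succ, List.count_append, ih (by omega), List.count_replicate]
    by_cases hc : c = Char.ofNat m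
    · subst hc
      rw [toNat_ofNat256 (by omega)]
      simp
    · have hne : c.toNat ≠ m := by
        intro h
        exact hc (by rw [← h, Char.ofNat_toNat])
      rw [if_neg (fun h => hc (beq_iff_eq.mp h).symm), Nat.add_zero]
      by_cases hlt : c.toNat < m
      · rw [if_pos hlt, if_pos (by omega)]
      · rw [if_neg hlt, if_neg (by omega)]

lemma perm_csF (s : List Char) (h : ∀ c ∈ s, c.toNat < 256) : (csF s 256).Perm s := by
  rw [List.perm_iff_count]
  intro c
  rw [count_csF s 256 le_rfl c]
  by_cases hc : c.toNat < 256
  · rw [if_pos hc]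
  · rw [if_neg hc, eq_comm, List.count_eq_zero]
    intro hmem
    exact hc (h c hmem)

lemma csortB_eq (s : List Char) (h : ∀ c ∈ s, c.toNat < 256) :
    csortB s = PySem.List.sorted s (fun x => x) false := by
  have h1 : csortB s = csF s 256 := by
    unfold csortB
    rw [PySem.Dict.foldl_insert_getD_add_one_eq_counter,
      PySem.List.foldl_append_eq_flatMap, List.nil_append, PySem.List.pyRange_one]
    simp [csF, List.flatMap_map, PySem.Dict.getD_counter]
  rw [h1]
  exact (PySem.List.sorted_id_eq_of_perm_of_pairwise s (csF s 256) (perm_csF s h)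
    (pairwise_csF s 256 le_rfl)).symm

lemma mainScan : ∀ (u v : List Char), ¬ (u ++ [' ']) <+: v →
    pvGo (u ++ [' ']) v = bSpec u v := by
  intro u
  induction u with
  | nil =>
    intro v hp
    cases v with
    | nil => rfl
    | cons y ys =>
      by_cases hy : y = ' '
      · exact absurd ⟨ys, by rw [hy]; rfl⟩ hp
      · show (if y ≠ ' ' then some y else pvGo [] ys) = bSpec [] (y :: ys)
        rw [if_pos hy]
        simp [bSpec, goZ]
  | cons x xs ih =>
    intro v hp
    cases v with
    | nil =>
      show pvGo ((x :: xs) ++ [' ']) [] = bSpec (x :: xs) []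
      rw [pvGo_nil_right]
      rfl
    | cons y ys =>
      show (if y ≠ x then some y else pvGo (xs ++ [' ']) ys) = bSpec (x :: xs) (y :: ys)
      by_cases hxy : x = y
      · subst hxy
        rw [if_neg (by simp)]
        have hp' : ¬ (xs ++ [' ']) <+: ys := by
          intro hpre
          exact hp (by simpa [List.cons_prefix_cons] using hpre)
        rw [ih ys hp']
        simp [bSpec, goZ]
      · rw [if_pos (fun h => hxy h.symm)]
        simp [bSpec, goZ, hxy]

lemma bZip_eq (a b : List Char) :
    bZip a b = (bSpec a b).map (fun y => String.ofList [y]) := by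
  unfold bZip bSpec
  cases goZ a b with
  | some y => rfl
  | none =>
    by_cases hl : b.length > a.length
    · rw [if_pos hl, if_pos hl]
      have : (a.length : Int) = ((a.length : Nat) : Int) := rfl
      rw [PySem.List.pyGet?_natCast]
    · rw [if_neg hl, if_neg hl]
      rfl

lemma dom_chars (s1 s2 : String) (h : Dom_csFindAddedLetter s1 s2) :
    (∀ c ∈ s1.toList, c.toNat < 256) ∧ (∀ c ∈ s2.toList, c.toNat < 256) := by
  unfold Dom_csFindAddedLetter pvDomStr at h
  rw [Bool.and_eq_true] at h
  constructor <;> intro c hc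
  · have := List.all_eq_true.mp h.1 c hc
    simp [pvDomChar] at this
    omega
  · have := List.all_eq_true.mp h.2 c hc
    simp [pvDomChar] at this
    omega

-- D_ says exactly: str_2 is a permutation of str_1 plus one space, and str_1 is all ≤ ' '
lemma D_iff (s1 s2 : String) :
    D_csFindAddedLetter s1 s2 ↔
      (s2.toList.Perm (' ' :: s1.toList) ∧ ∀ c ∈ s1.toList, c ≤ ' ') := by
  unfold D_csFindAddedLetter
  constructor
  · rintro ⟨h1, h2⟩
    exact ⟨h1, fun c hc => of_decide_eq_true (List.all_eq_true.mp h2 c hc)⟩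
  · rintro ⟨h1, h2⟩
    exact ⟨h1, List.all_eq_true.mpr fun c hc => decide_eq_true (h2 c hc)⟩

lemma not_prefix (s1 s2 : String) (hpre : Pre_csFindAddedLetter s1 s2)
    (hnd : ¬ D_csFindAddedLetter s1 s2) :
    ¬ (PySem.List.sorted s1.toList (fun x => x) false ++ [' '])
        <+: PySem.List.sorted s2.toList (fun x => x) false := by
  intro hp
  have p1 : (PySem.List.sorted s1.toList (fun x => x) false).Perm s1.toList :=
    PySem.List.sorted_perm s1.toList (fun x => x) false
  have p2 : (PySem.List.sorted s2.toList (fun x => x) false).Perm s2.toList :=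
    PySem.List.sorted_perm s2.toList (fun x => x) false
  have hlen1 : (PySem.List.sorted s1.toList (fun x => x) false).length = s1.toList.length :=
    p1.length_eq
  have hlen2 : (PySem.List.sorted s2.toList (fun x => x) false).length = s2.toList.length :=
    p2.length_eq
  have hlenp : (PySem.List.sorted s1.toList (fun x => x) false ++ [' ']).length
      = s1.toList.length + 1 := by
    rw [List.length_append, List.length_singleton, hlen1]
  have hle : s1.toList.length + 1 ≤ s2.toList.length := by
    have h := hp.length_le
    rw [hlenp, hlen2] at h
    exact h
  rcases Nat.lt_or_ge (s1.toList.length + 1) s2.toList.length with hlt | hge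
  · -- strictly longer: exactly the excluded IndexError shape
    apply hpre
    refine ⟨hlt, ?_⟩
    have ht := List.prefix_iff_eq_take.mp hp
    rw [← hlenp]
    exact ht.symm
  · -- equal length: str_2 = str_1 plus one space, contradicting ¬D_
    have heq : (PySem.List.sorted s1.toList (fun x => x) false ++ [' '])
        = PySem.List.sorted s2.toList (fun x => x) false := by
      apply List.IsPrefix.eq_of_length hp
      rw [hlenp, hlen2]
      omega
    apply hnd
    apply (D_iff s1 s2).mpr
    constructor
    · have q : (PySem.List.sorted s2.toList (fun x => x) false).Perm (' ' :: s1.toList) := by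
        rw [← heq]
        exact (List.perm_append_singleton _ _).trans (p1.cons ' ')
      exact p2.symm.trans q
    · intro c hc
      have hcu : c ∈ PySem.List.sorted s1.toList (fun x => x) false :=
        (PySem.List.mem_sorted _ _ _ _).mpr hc
      have hpw : (PySem.List.sorted s1.toList (fun x => x) false ++ [' ']).Pairwise (· ≤ ·) := by
        rw [heq]
        simpa using PySem.List.sorted_pairwise s2.toList (fun x => x)
      exact (List.pairwise_append.mp hpw).2.2 c hcu ' ' (by simp)

lemma D_sorted (s1 s2 : String) (hd : D_csFindAddedLetter s1 s2) :
    PySem.List.sorted s2.toList (fun x => x) false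
      = PySem.List.sorted s1.toList (fun x => x) false ++ [' '] := by
  obtain ⟨hp, hle⟩ := (D_iff s1 s2).mp hd
  apply PySem.List.sorted_id_eq_of_perm_of_pairwise
  · exact ((List.perm_append_singleton _ _).trans
      ((PySem.List.sorted_perm s1.toList (fun x => x) false).cons ' ')).trans hp.symm
  · apply List.pairwise_append.mpr
    refine ⟨by simpa using PySem.List.sorted_pairwise s1.toList (fun x => x), by simp, ?_⟩
    intro x hx y hy
    rw [List.mem_singleton.mp hy]
    exact hle x ((PySem.List.mem_sorted _ _ _ _).mp hx)

lemma pvGo_refl (w : List Char) : pvGo w w = none := by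
  induction w with
  | nil => rfl
  | cons a t ih => simpa [pvGo] using ih

lemma goZ_append_self (u t : List Char) : goZ u (u ++ t) = none := by
  induction u with
  | nil => cases t <;> rfl
  | cons x xs ih => simpa [goZ] using ih

-- ===== VERDICT (by name: the statements are the Claim_ definitions above) =====
theorem csFindAddedLetter_spec : Claim_unchanged_csFindAddedLetter := by
  intro s1 s2 hdom hpre hnd
  obtain ⟨h1, h2⟩ := dom_chars s1 s2 hdom
  show csFindAddedLetter s1 s2 = csFindAddedLetter_alt s1 s2
  unfold csFindAddedLetter csFindAddedLetter_alt
  rw [csortB_eq _ h1, csortB_eq _ h2, bZip_eq]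
  have h0 : (0 : Int) = ((0 : Nat) : Int) := rfl
  rw [h0, bridgeA, List.drop_zero, mainScan _ _ (not_prefix s1 s2 hpre hnd)]

set_option maxRecDepth 16384 in
theorem csFindAddedLetter_changed : Claim_changed_csFindAddedLetter := by
  unfold Claim_changed_csFindAddedLetter
  decide

theorem csFindAddedLetter_tight : Claim_exact_csFindAddedLetter := by
  intro s1 s2 hdom hpre hd
  obtain ⟨h1, h2⟩ := dom_chars s1 s2 hdom
  unfold csFindAddedLetter csFindAddedLetter_alt
  rw [csortB_eq _ h1, csortB_eq _ h2, D_sorted s1 s2 hd]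
  have h0 : (0 : Int) = ((0 : Nat) : Int) := rfl
  rw [h0, bridgeA, List.drop_zero, pvGo_refl]
  unfold bZip
  rw [goZ_append_self]
  have hl : (PySem.List.sorted s1.toList (fun x => x) false ++ [' ']).length
      > (PySem.List.sorted s1.toList (fun x => x) false).length := by simp
  rw [if_pos hl, PySem.List.pyGet?_natCast, List.getElem?_concat_length]
  simp
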